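-- pv_equiv track=rewrite | github.com/chimel3/thecup | functions/InGameFunctions/MatchEngine/matchengine.py | create_fixtures
-- ===== SOURCE A (Python) =====
-- def create_fixtures(teamlist):
--     ''' Takes a list of teams and returns a fixture list (list of lists) '''
--     fixtures = []
--     current_match = []
--     for team in teamlist:
--         if len(current_match) == 0:
--             current_match = [team]
--         else:
--             current_match.append(team)
--             fixtures.append(current_match)
--             current_match = []
--     return fixtures
-- ===== SOURCE B (Python) =====
-- def create_fixtures(teamlist):
--     ''' Takes a list of teams and returns a fixture list (list of lists) '''
--     return [[a, b] for a, b in zip(teamlist[::2], teamlist[1::2])]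
-- ===== Notes on version B (the rewrite author's own statement) =====
-- stated objective: idiomatic
-- what changed: Replaced the stateful accumulator loop (fixtures/current_match bookkeeping) with positional pairing of the even- and odd-index strided slices via zip, whose truncation drops an unpaired trailing team just as A leaves an incomplete current_match unappended.
import Mathlib
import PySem

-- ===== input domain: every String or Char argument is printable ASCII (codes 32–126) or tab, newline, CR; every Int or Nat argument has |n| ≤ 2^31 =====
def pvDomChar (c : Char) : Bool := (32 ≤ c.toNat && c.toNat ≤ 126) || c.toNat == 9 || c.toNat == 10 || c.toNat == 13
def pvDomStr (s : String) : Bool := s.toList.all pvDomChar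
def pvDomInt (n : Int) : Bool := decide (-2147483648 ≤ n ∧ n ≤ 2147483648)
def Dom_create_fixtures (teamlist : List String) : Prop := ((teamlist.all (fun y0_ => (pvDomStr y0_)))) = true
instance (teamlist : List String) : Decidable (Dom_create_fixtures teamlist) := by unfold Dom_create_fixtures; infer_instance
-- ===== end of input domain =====

-- B replaces A's stateful accumulator loop with zip of the even/odd strided slices (objective: idiomatic).

-- ===== PORT A =====
-- A: fold over teamlist carrying (fixtures, current_match); an incomplete current_match is dropped.
def cfStep (st : List (List String) × List String) (team : String) : List (List String) × List String :=
  if st.2.length == 0 then (st.1, [team])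
  else (st.1 ++ [st.2 ++ [team]], [])

def create_fixtures (teamlist : List String) : List (List String) :=
  let st := teamlist.foldl cfStep ([], [])
  st.1

-- ===== PORT B =====
-- B: [[a, b] for a, b in zip(teamlist[::2], teamlist[1::2])]; slice? never returns
-- none for step 2, the fallthrough branch is unreachable.
def create_fixtures_alt (teamlist : List String) : List (List String) :=
  match PySem.List.slice? teamlist none none 2, PySem.List.slice? teamlist (some 1) none 2 with
  | some ev, some od => (ev.zip od).map (fun p => [p.1, p.2])
  | _, _ => []

-- ===== PRECONDITION & SPEC =====
def Spec_create_fixtures (teamlist : List String) (out : List (List String)) : Prop := out = create_fixtures_alt teamlist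
instance (teamlist : List String) (out : List (List String)) : Decidable (Spec_create_fixtures teamlist out) := by unfold Spec_create_fixtures; infer_instance

-- ===== CLAIM (what is proved, stated in full; the proofs are below) =====
def Claim_equal_create_fixtures : Prop := ∀ (teamlist : List String), Dom_create_fixtures teamlist → Spec_create_fixtures teamlist (create_fixtures teamlist)

-- ===== LEMMAS AND PROOFS =====

-- Proof-only helpers: the elements at even indices, at odd indices, and the pairing both programs compute.
def evens {α : Type} : List α → List α
  | [] => []
  | [a] => [a]
  | a :: _ :: r => a :: evens r

def odds {α : Type} : List α → List α
  | [] => []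
  | [_] => []
  | _ :: b :: r => b :: odds r

def pairs {α : Type} : List α → List (List α)
  | a :: b :: r => [a, b] :: pairs r
  | _ => []

lemma core_even {α : Type} (l : List α) :
    List.filterMap (fun k => l[2*k]?) (List.range ((l.length+1)/2)) = evens l := by
  induction l using evens.induct with
  | case1 => simp [evens]
  | case2 a => simp [evens]
  | case3 a b r ih =>
      have hc : ((a :: b :: r).length + 1) / 2 = (r.length + 1) / 2 + 1 := by simp; omega
      rw [hc, List.range_succ_eq_map, List.filterMap_cons, List.filterMap_map]
      simp only [Nat.mul_zero, List.getElem?_cons_zero]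
      show a :: List.filterMap ((fun k => (a :: b :: r)[2*k]?) ∘ (· + 1)) (List.range ((r.length+1)/2)) = evens (a :: b :: r)
      have hf : ((fun k => (a :: b :: r)[2*k]?) ∘ (· + 1)) = (fun k => r[2*k]?) := by
        funext k
        show (a :: b :: r)[2*(k+1)]? = r[2*k]?
        have : 2*(k+1) = 2*k + 1 + 1 := by omega
        rw [this]; simp
      rw [hf, ih, evens]

lemma core_odd {α : Type} (l : List α) :
    List.filterMap (fun k => l[2*k+1]?) (List.range (l.length/2)) = odds l := by
  induction l using odds.induct with
  | case1 => simp [odds]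
  | case2 a => simp [odds]
  | case3 a b r ih =>
      have hc : (a :: b :: r).length / 2 = r.length / 2 + 1 := by simp; omega
      rw [hc, List.range_succ_eq_map, List.filterMap_cons, List.filterMap_map]
      simp only [Nat.mul_zero, Nat.zero_add, List.getElem?_cons_succ, List.getElem?_cons_zero]
      show b :: List.filterMap ((fun k => (a :: b :: r)[2*k+1]?) ∘ (· + 1)) (List.range (r.length/2)) = odds (a :: b :: r)
      have hf : ((fun k => (a :: b :: r)[2*k+1]?) ∘ (· + 1)) = (fun k => r[2*k+1]?) := by
        funext k
        show (a :: b :: r)[2*(k+1)+1]? = r[2*k+1]?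
        have : 2*(k+1)+1 = (2*k+1) + 1 + 1 := by omega
        rw [this]; simp
      rw [hf, ih, odds]

-- teamlist[::2] is the even-index elements.
lemma slice_even {α : Type} (l : List α) : PySem.List.slice? l none none 2 = some (evens l) := by
  rw [← core_even]
  simp only [PySem.List.slice?, PySem.List.sliceIndices]
  norm_num
  have hc : (if 0 < l.length then (((l.length : Int) + 2 - 1) / 2).toNat else 0) = (l.length + 1) / 2 := by
    split_ifs <;> omega
  rw [hc]
  apply List.filterMap_congr
  intro k _
  have : (2 * (k:Int)).toNat = 2 * k := by omega
  rw [this]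

-- teamlist[1::2] is the odd-index elements.
lemma slice_odd {α : Type} (l : List α) : PySem.List.slice? l (some 1) none 2 = some (odds l) := by
  rw [← core_odd]
  simp only [PySem.List.slice?, PySem.List.sliceIndices]
  norm_num
  have hc : (if 1 < l.length
      then (((l.length : Int) - min 1 (l.length : Int) + 2 - 1) / 2).toNat else 0) = l.length / 2 := by
    split_ifs <;> omega
  rw [hc]
  apply List.filterMap_congr
  intro k hk
  simp only [List.mem_range] at hk
  have : (min 1 (l.length : Int) + 2 * (k:Int)).toNat = 2 * k + 1 := by omega
  rw [this]

-- Zipping the even and odd subsequences yields the consecutive pairing.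
lemma zip_evens_odds {α : Type} (l : List α) :
    ((evens l).zip (odds l)).map (fun p => [p.1, p.2]) = pairs l := by
  induction l using pairs.induct with
  | case1 a b r ih => simp only [evens, odds, List.zip_cons_cons, List.map_cons, ih, pairs]
  | case2 l h =>
      cases l with
      | nil => rfl
      | cons a t =>
        cases t with
        | nil => rfl
        | cons b r => exact absurd rfl (h a b r)

lemma alt_eq_pairs (l : List String) : create_fixtures_alt l = pairs l := by
  unfold create_fixtures_alt
  rw [slice_even, slice_odd]
  exact zip_evens_odds l

-- Loop invariant for A's fold: started with an empty current_match and accumulator acc,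
-- the fixtures component is acc followed by the consecutive pairing of the remaining list.
lemma create_fixtures_loop (l : List String) :
    ∀ acc : List (List String),
      (l.foldl cfStep (acc, [])).1 = acc ++ pairs l := by
  induction l using pairs.induct with
  | case1 a b rest ih =>
      intro acc
      show (List.foldl cfStep (acc ++ [[a, b]], []) rest).1 = acc ++ pairs (a :: b :: rest)
      rw [ih, pairs]
      simp
  | case2 l h =>
      intro acc
      cases l with
      | nil => simp [pairs]
      | cons a t =>
        cases t with
        | nil => simp [List.foldl, cfStep, pairs]
        | cons b r => exact absurd rfl (h a b r)

-- ===== VERDICT (by name: the statement is the Claim_ definition above) =====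
theorem create_fixtures_spec : Claim_equal_create_fixtures := by
  intro teamlist _
  unfold Spec_create_fixtures create_fixtures
  rw [alt_eq_pairs]
  simpa using create_fixtures_loop teamlist []
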